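-- pv_equiv track=rewrite | github.com/jashahir/cellograph | cellograph/cellograph.py | limit_data
-- ===== SOURCE A (Python) =====
-- def limit_data(labels,limit=20,val_num=400,test_num=400):
--     '''
--     Get the index of train, validation, and test data
--     '''
--     label_counter = dict((l, 0) for l in labels)
--     train_idx = []
--
--     for i in range(len(labels)):
--         label = labels[i]
--         if label_counter[label]<limit:
--             train_idx.append(i)
--             label_counter[label]+=1
--
--         if all(count == limit for count in label_counter.values()):
--             break
--
--
--     rest_idx = [x for x in range(len(labels)) if x not in train_idx]
--     val_idx = rest_idx[:val_num]
--     test_idx = rest_idx[val_num:(val_num+test_num)]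
--     return train_idx, val_idx,test_idx
-- ===== SOURCE B (Python) =====
-- def limit_data(labels, limit=20, val_num=400, test_num=400):
--     '''
--     Get the index of train, validation, and test data
--     '''
--     # index table: label -> ascending list of its positions
--     pos = {}
--     for i, l in enumerate(labels):
--         pos.setdefault(l, []).append(i)
--     cap = max(limit, 0)
--     train_set = set()
--     for p in pos.values():
--         train_set.update(p[:cap])
--     train_idx = sorted(train_set)
--     rest_idx = [i for i in range(len(labels)) if i not in train_set]
--     val_idx = rest_idx[:val_num]
--     test_idx = rest_idx[val_num:val_num + test_num]
--     return train_idx, val_idx, test_idx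
-- ===== Notes on version B (the rewrite author's own statement) =====
-- stated objective: faster
-- what changed: Replaces A's stateful counter loop (with early break) plus per-index list-membership rest scan by a label->positions index table built once: take the first `limit` positions of each label as a train set, then derive train (sorted) and rest by O(1) set membership.
import Mathlib
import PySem

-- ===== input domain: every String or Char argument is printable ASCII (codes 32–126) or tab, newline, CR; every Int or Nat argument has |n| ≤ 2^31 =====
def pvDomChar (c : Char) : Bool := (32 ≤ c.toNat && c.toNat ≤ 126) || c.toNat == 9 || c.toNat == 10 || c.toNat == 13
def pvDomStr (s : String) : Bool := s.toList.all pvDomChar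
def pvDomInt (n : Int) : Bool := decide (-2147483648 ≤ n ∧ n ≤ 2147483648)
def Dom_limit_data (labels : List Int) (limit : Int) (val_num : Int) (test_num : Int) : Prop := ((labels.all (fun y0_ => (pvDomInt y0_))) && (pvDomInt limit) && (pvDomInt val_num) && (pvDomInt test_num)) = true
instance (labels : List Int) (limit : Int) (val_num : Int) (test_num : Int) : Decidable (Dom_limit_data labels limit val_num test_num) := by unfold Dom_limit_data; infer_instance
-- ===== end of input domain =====

-- B builds a label → positions index table once, takes the first `limit` positions of each label
-- and derives train/rest by membership in that set (alternative decomposition, same outputs).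

-- ===== PORT A =====
-- the 'for i in range(len(labels))' loop with its early 'break'; state = (label_counter, train_idx).
-- label_counter[label] is ported as getD _ 0: every label of `labels` is a key of the dict, so no KeyError occurs.
def limit_data_loop (labels : List Int) (limit : Int) :
    List Int → PySem.Dict Int Int × List Int → PySem.Dict Int Int × List Int
  | [], st => st
  | i :: is, st =>
    let label := PySem.List.pyGetD labels i 0
    let st' := if st.1.getD label 0 < limit
               then (st.1.modify label 0 (· + 1), st.2 ++ [i])
               else st
    if st'.1.values.all (fun c => c == limit) then st'
    else limit_data_loop labels limit is st'

def limit_data (labels : List Int) (limit : Int) (val_num : Int) (test_num : Int) :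
    List Int × List Int × List Int :=
  let label_counter := labels.foldl (fun d l => d.insert l 0) PySem.Dict.empty
  let res := limit_data_loop labels limit (PySem.List.pyRange 0 labels.length 1) (label_counter, [])
  let train_idx := res.2
  let rest_idx := (PySem.List.pyRange 0 labels.length 1).filter (fun x => !(train_idx.contains x))
  let val_idx := PySem.List.slice rest_idx none (some val_num)
  let test_idx := PySem.List.slice rest_idx (some val_num) (some (val_num + test_num))
  (train_idx, val_idx, test_idx)

-- ===== PORT B =====
def limit_data_alt (labels : List Int) (limit : Int) (val_num : Int) (test_num : Int) :
    List Int × List Int × List Int :=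
  let pos := (PySem.List.enumerate labels 0).foldl
      (fun d p => d.modify p.2 [] (fun q => q ++ [p.1])) PySem.Dict.empty
  let cap := max limit 0
  let train_set := pos.values.foldl
      (fun s p => PySem.Set.update s (PySem.List.slice p none (some cap))) PySem.Set.empty
  let train_idx := PySem.List.sorted train_set (fun x => x) false
  let rest_idx := (PySem.List.pyRange 0 labels.length 1).filter
      (fun i => !(PySem.Set.contains train_set i))
  let val_idx := PySem.List.slice rest_idx none (some val_num)
  let test_idx := PySem.List.slice rest_idx (some val_num) (some (val_num + test_num))
  (train_idx, val_idx, test_idx)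

-- ===== PRECONDITION & SPEC =====
def Spec_limit_data (labels : List Int) (limit : Int) (val_num : Int) (test_num : Int) (out : List Int × List Int × List Int) : Prop := out = limit_data_alt labels limit val_num test_num
instance (labels : List Int) (limit : Int) (val_num : Int) (test_num : Int) (out : List Int × List Int × List Int) : Decidable (Spec_limit_data labels limit val_num test_num out) := by unfold Spec_limit_data; infer_instance

-- ===== CLAIM (what is proved, stated in full; the proofs are below) =====
def Claim_equal_limit_data : Prop := ∀ (labels : List Int) (limit : Int) (val_num : Int) (test_num : Int), Dom_limit_data labels limit val_num test_num → Spec_limit_data labels limit val_num test_num (limit_data labels limit val_num test_num)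

-- ===== LEMMAS AND PROOFS =====


-- index i of `labels` is a "train" index iff fewer than `limit` earlier positions carry the same label
def rankLT (labels : List Int) (limit : Int) (i : Int) : Bool :=
  decide (((labels.take i.toNat).count (PySem.List.pyGetD labels i 0) : Int) < limit)

-- the common characterisation of the train list
def trainOf (labels : List Int) (limit : Int) : List Int :=
  (PySem.List.pyRange 0 labels.length 1).filter (rankLT labels limit)

-- ascending positions of label l
def posList (labels : List Int) (l : Int) : List Int :=
  (PySem.List.pyRange 0 labels.length 1).filter (fun j => PySem.List.pyGetD labels j 0 == l)

lemma countP_range_eq_count_take (labels : List Int) (l : Int) (m : Nat) (hm : m ≤ labels.length) :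
    (List.range m).countP (fun k => labels.getD k 0 == l) = (labels.take m).count l := by
  induction m with
  | zero => simp
  | succ m ih =>
    rw [List.range_succ, List.take_add_one, List.countP_append, List.count_append, ih (by omega)]
    have hlt : m < labels.length := by omega
    simp [List.getD, List.getElem?_eq_getElem hlt, List.count]

lemma take_filter_pyRange (n : Nat) (q : Int → Bool) (k : Nat) :
    ((PySem.List.pyRange 0 (n : Int) 1).filter q).take k
      = (PySem.List.pyRange 0 (n : Int) 1).filter
          (fun i => q i && decide (((PySem.List.pyRange 0 i 1).filter q).length < k)) := by
  induction n with
  | zero => simp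
  | succ n ih =>
    have hsplit : PySem.List.pyRange 0 ((n+1 : Nat) : Int) 1
        = PySem.List.pyRange 0 (n : Int) 1 ++ [(n : Int)] := by
      push_cast
      rw [PySem.List.pyRange_one_succ_right (by positivity)]
    rw [hsplit, List.filter_append, List.filter_append, List.take_append, ih]
    congr 1
    by_cases hq : q n
    · simp only [List.filter_singleton, hq, cond_true]
      by_cases hlt : ((PySem.List.pyRange 0 (n:Int) 1).filter q).length < k
      · have h1 : 1 ≤ k - ((PySem.List.pyRange 0 (n:Int) 1).filter q).length := by omega
        simp [hlt, List.take_of_length_le, h1]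
      · have h0 : k - ((PySem.List.pyRange 0 (n:Int) 1).filter q).length = 0 := by omega
        simp [hlt, h0]
    · simp [hq]

-- length of the label filter over an initial index range = count in the prefix
lemma length_filter_pyRange_label (labels : List Int) (l : Int) (x : Int)
    (h0 : 0 ≤ x) (hx : x ≤ (labels.length : Int)) :
    ((PySem.List.pyRange 0 x 1).filter (fun j => PySem.List.pyGetD labels j 0 == l)).length
      = (labels.take x.toNat).count l := by
  rw [← countP_range_eq_count_take labels l x.toNat (by omega)]
  rw [PySem.List.pyRange_one, List.filter_map, List.length_map,
      ← List.countP_eq_length_filter]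
  have h1 : (x - 0).toNat = x.toNat := by omega
  rw [h1]
  apply List.countP_congr
  intro k _
  simp [Function.comp]

lemma mem_posList_take (labels : List Int) (limit : Int) (l x : Int) :
    x ∈ (posList labels l).take (max limit 0).toNat
      ↔ (0 ≤ x ∧ x < (labels.length : Int) ∧ PySem.List.pyGetD labels x 0 = l
          ∧ (((labels.take x.toNat).count l : Int) < limit)) := by
  rw [posList, take_filter_pyRange labels.length _ (max limit 0).toNat]
  rw [List.mem_filter]
  constructor
  · rintro ⟨hmem, hcond⟩
    rw [PySem.List.mem_pyRange_one] at hmem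
    simp only [Bool.and_eq_true, beq_iff_eq, decide_eq_true_eq] at hcond
    obtain ⟨hl, hcnt⟩ := hcond
    rw [length_filter_pyRange_label labels l x hmem.1 (le_of_lt hmem.2)] at hcnt
    exact ⟨hmem.1, hmem.2, hl, by omega⟩
  · rintro ⟨h0, hx, hl, hcnt⟩
    refine ⟨PySem.List.mem_pyRange_one.mpr ⟨h0, hx⟩, ?_⟩
    simp only [Bool.and_eq_true, beq_iff_eq, decide_eq_true_eq]
    refine ⟨hl, ?_⟩
    rw [length_filter_pyRange_label labels l x h0 (le_of_lt hx)]
    omega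

lemma mem_trainB (labels : List Int) (limit : Int) (x : Int) :
    x ∈ (PySem.Set.ofList labels).flatMap
          (fun l => (posList labels l).take (max limit 0).toNat)
      ↔ x ∈ trainOf labels limit := by
  rw [List.mem_flatMap, trainOf, List.mem_filter]
  constructor
  · rintro ⟨l, _, hx⟩
    rw [mem_posList_take] at hx
    obtain ⟨h0, hn, hl, hcnt⟩ := hx
    refine ⟨PySem.List.mem_pyRange_one.mpr ⟨h0, hn⟩, ?_⟩
    simp only [rankLT, decide_eq_true_eq]
    rw [hl]; exact hcnt
  · rintro ⟨hmem, hrank⟩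
    rw [PySem.List.mem_pyRange_one] at hmem
    refine ⟨PySem.List.pyGetD labels x 0, ?_, ?_⟩
    · rw [PySem.Set.mem_ofList]
      exact PySem.List.pyGetD_mem labels 0 (by constructor <;> omega)
    · rw [mem_posList_take]
      simp only [rankLT, decide_eq_true_eq] at hrank
      exact ⟨hmem.1, hmem.2, rfl, hrank⟩

-- the fold of Set.update over pairwise-disjoint nodup blocks is concatenation
lemma foldl_update_eq_append (G : Int → List Int) :
    ∀ (L : List Int) (s : List Int), L.Nodup → (∀ l ∈ L, (G l).Nodup) →
      (∀ l ∈ L, ∀ x ∈ G l, x ∉ s) →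
      (∀ l₁ ∈ L, ∀ l₂ ∈ L, l₁ ≠ l₂ → ∀ x ∈ G l₁, x ∉ G l₂) →
      L.foldl (fun s l => PySem.Set.update s (G l)) s = s ++ L.flatMap G := by
  intro L
  induction L with
  | nil => simp
  | cons l L ih =>
    intro s hnd hGnd hdisj hpair
    simp only [List.foldl_cons, List.flatMap_cons]
    rw [PySem.Set.update_eq_append_of_disjoint s (G l) (hGnd l (by simp))
        (fun x hx => hdisj l (by simp) x hx)]
    rw [ih (s ++ G l) hnd.of_cons (fun a ha => hGnd a (by simp [ha]))
        (fun a ha x hx => by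
          simp only [List.mem_append]
          push Not
          refine ⟨hdisj a (by simp [ha]) x hx, ?_⟩
          have hne : a ≠ l := by rintro rfl; exact (List.nodup_cons.mp hnd).1 ha
          exact hpair a (by simp [ha]) l (by simp) hne x hx)
        (fun a ha b hb hne x hx => hpair a (by simp [ha]) b (by simp [hb]) hne x hx)]
    simp

-- the pos dict of B: per-key value lists and key set
lemma pos_getD (labels : List Int) (l : Int) :
    ((PySem.List.enumerate labels 0).foldl
        (fun d p => d.modify p.2 [] (fun q => q ++ [p.1])) PySem.Dict.empty).getD l []
      = posList labels l := by
  have h1 : (PySem.List.enumerate labels 0).foldl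
        (fun d p => d.modify p.2 [] (fun q => q ++ [p.1])) PySem.Dict.empty
      = ((PySem.List.enumerate labels 0).map (fun p => (p.2, p.1))).foldl
        (fun d p => d.modify p.1 [] (fun q => q ++ [p.2])) PySem.Dict.empty := by
    rw [List.foldl_map]
  rw [h1, PySem.Dict.getD_foldl_modify_append]
  rw [List.filter_map, List.map_map]
  have h2 : PySem.List.enumerate labels 0
      = (PySem.List.pyRange 0 labels.length 1).map (fun j => (j, PySem.List.pyGetD labels j 0)) := by
    simpa using PySem.List.enumerate_eq_map_pyRange labels 0
  rw [h2, List.filter_map, List.map_map]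
  simp [posList, Function.comp_def]

lemma pos_keys (labels : List Int) :
    ((PySem.List.enumerate labels 0).foldl
        (fun d p => d.modify p.2 [] (fun q => q ++ [p.1])) PySem.Dict.empty).keys
      = PySem.Set.ofList labels := by
  have := PySem.Dict.keys_foldl_modify_key (PySem.List.enumerate labels 0)
      (fun p => p.2) [] (fun _ p q => q ++ [p.1]) (PySem.Dict.empty (κ := Int) (ν := List Int))
  simpa [PySem.List.map_snd_enumerate, PySem.Set.update_empty] using this

lemma nodup_posList_take (labels : List Int) (limit : Int) (l : Int) :
    ((posList labels l).take (max limit 0).toNat).Nodup :=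
  ((List.take_sublist _ _).trans (List.filter_sublist)).nodup
    (PySem.List.nodup_pyRange_one 0 labels.length)

lemma trainB_set_eq (labels : List Int) (limit : Int) :
    ((PySem.List.enumerate labels 0).foldl
        (fun d p => d.modify p.2 [] (fun q => q ++ [p.1])) PySem.Dict.empty).values.foldl
      (fun s p => PySem.Set.update s (PySem.List.slice p none (some (max limit 0))))
      PySem.Set.empty
      = (PySem.Set.ofList labels).flatMap
          (fun l => (posList labels l).take (max limit 0).toNat) := by
  set pos := (PySem.List.enumerate labels 0).foldl
      (fun d p => d.modify p.2 [] (fun q => q ++ [p.1])) PySem.Dict.empty with hpos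
  have hkeys : pos.keys = PySem.Set.ofList labels := pos_keys labels
  have hnd : pos.keys.Nodup := by rw [hkeys]; exact PySem.Set.nodup_ofList labels
  rw [PySem.Dict.values_eq_map_keys pos hnd [], List.foldl_map, hkeys]
  calc (PySem.Set.ofList labels).foldl
        (fun s l => PySem.Set.update s (PySem.List.slice (pos.getD l []) none (some (max limit 0))))
        PySem.Set.empty
      = (PySem.Set.ofList labels).foldl
        (fun s l => PySem.Set.update s ((posList labels l).take (max limit 0).toNat))
        PySem.Set.empty := by
        apply PySem.List.foldl_congr_mem
        intro acc x _
        rw [pos_getD labels x, PySem.List.slice_to _ (by omega)]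
    _ = (PySem.Set.ofList labels).flatMap
          (fun l => (posList labels l).take (max limit 0).toNat) := by
        rw [foldl_update_eq_append]
        · rfl
        · exact PySem.Set.nodup_ofList labels
        · intro l _; exact nodup_posList_take labels limit l
        · intro l _ x hx; simp [PySem.Set.empty]
        · intro l₁ _ l₂ _ hne x hx1 hx2
          rw [mem_posList_take] at hx1 hx2
          exact hne (hx1.2.2.1 ▸ hx2.2.2.1 ▸ rfl)

lemma nodup_trainB (labels : List Int) (limit : Int) :
    ((PySem.Set.ofList labels).flatMap
        (fun l => (posList labels l).take (max limit 0).toNat)).Nodup := by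
  rw [← trainB_set_eq]
  have h : ∀ (vs : List (List Int)) (s : List Int), s.Nodup →
      (vs.foldl (fun s p => PySem.Set.update s
        (PySem.List.slice p none (some (max limit 0)))) s).Nodup := by
    intro vs
    induction vs with
    | nil => intro s hs; exact hs
    | cons v vs ih => intro s hs; exact ih _ (PySem.Set.nodup_update s _ hs)
  exact h _ _ (by simp [PySem.Set.empty])

lemma trainOf_pairwise (labels : List Int) (limit : Int) :
    (trainOf labels limit).Pairwise (fun a b => a < b) :=
  (PySem.List.pairwise_lt_pyRange_one 0 labels.length).filter _

lemma trainOf_perm_trainB (labels : List Int) (limit : Int) :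
    (trainOf labels limit).Perm
      ((PySem.Set.ofList labels).flatMap
        (fun l => (posList labels l).take (max limit 0).toNat)) := by
  rw [show trainOf labels limit
      = (PySem.List.pyRange 0 labels.length 1).filter (rankLT labels limit) from rfl]
  rw [List.perm_ext_iff_of_nodup
      ((PySem.List.nodup_pyRange_one 0 labels.length).filter _)
      (nodup_trainB labels limit)]
  intro a
  exact Iff.symm (mem_trainB labels limit a)

lemma count_take_succ (labels : List Int) (k : Nat) (h : k < labels.length) (l : Int) :
    (labels.take (k+1)).count l
      = (labels.take k).count l + (if labels[k] = l then 1 else 0) := by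
  rw [List.take_add_one, List.count_append]
  simp [List.getElem?_eq_getElem h, List.count]

-- a value stored under a key of the dict occurs among its values
lemma getD_mem_values {d : PySem.Dict Int Int} {l : Int} (h : d.contains l = true) :
    d.getD l 0 ∈ d.values := by
  obtain ⟨v, hv⟩ : ∃ v, d.get? l = some v := by
    cases hg : d.get? l with
    | none => rw [PySem.Dict.get?_eq_none_iff_contains] at hg; rw [hg] at h; cases h
    | some v => exact ⟨v, rfl⟩
  rw [PySem.Dict.getD_eq_get?_getD, hv]
  have hmem := PySem.Dict.mem_items_of_get?_eq_some d hv
  simp only [Option.getD_some, PySem.Dict.values]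
  exact List.mem_map.mpr ⟨(l, v), hmem, rfl⟩

lemma loopA_char (labels : List Int) (limit : Int) :
    ∀ (m k : Nat) (c : PySem.Dict Int Int) (tr : List Int),
      labels.length - k = m → k ≤ labels.length →
      (∀ l ∈ labels, c.contains l = true) →
      (∀ l : Int, c.getD l 0 = min ((labels.take k).count l : Int) (max limit 0)) →
      (limit_data_loop labels limit (PySem.List.pyRange (k : Int) labels.length 1) (c, tr)).2
        = tr ++ (PySem.List.pyRange (k : Int) labels.length 1).filter (rankLT labels limit) := by
  intro m
  induction m with
  | zero =>
    intro k c tr hm hk _ _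
    have : (labels.length : Int) ≤ (k : Int) := by omega
    rw [PySem.List.pyRange_one_eq_nil this]
    simp [limit_data_loop]
  | succ m ih =>
    intro k c tr hm hk H1 H2
    have hklt : k < labels.length := by omega
    have hkltI : (k : Int) < (labels.length : Int) := by omega
    rw [PySem.List.pyRange_one_cons hkltI]
    show (limit_data_loop labels limit ((k:Int) :: PySem.List.pyRange ((k:Int)+1) labels.length 1) (c, tr)).2 = _
    have hlabel : PySem.List.pyGetD labels (k : Int) 0 = labels[k] := by
      rw [PySem.List.pyGetD_eq_getElem labels 0 (by omega) hkltI]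
      simp
    -- the branch condition of A agrees with rankLT
    have hcond : (c.getD (PySem.List.pyGetD labels (k:Int) 0) 0 < limit)
        ↔ rankLT labels limit (k : Int) = true := by
      rw [H2, rankLT]
      have : ((k : Int)).toNat = k := by omega
      rw [this]
      simp only [decide_eq_true_eq]
      omega
    -- the state after this iteration
    by_cases hlt : ((labels.take k).count (labels[k]) : Int) < limit
    case pos =>
      have hc : c.getD (PySem.List.pyGetD labels (k:Int) 0) 0 < limit := by
        rw [hlabel, H2]; omega
      have hrank : rankLT labels limit (k : Int) = true := hcond.mp hc
      -- new invariants for the counter with labels[k] bumped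
      have H1' : ∀ l ∈ labels, (c.modify (PySem.List.pyGetD labels (k:Int) 0) 0 (· + 1)).contains l = true := by
        intro l hl
        rw [PySem.Dict.contains_modify]
        simp [H1 l hl]
      have H2' : ∀ l : Int, (c.modify (PySem.List.pyGetD labels (k:Int) 0) 0 (· + 1)).getD l 0
          = min ((labels.take (k+1)).count l : Int) (max limit 0) := by
        intro l
        rw [PySem.Dict.getD_modify, hlabel]
        rw [count_take_succ labels k hklt l]
        by_cases hl : l = labels[k]
        · rw [if_pos hl, H2, hl]
          rw [if_pos rfl]
          push_cast
          omega
        · rw [if_neg hl, H2]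
          rw [if_neg (fun h => hl h.symm)]
          simp
      simp only [limit_data_loop, if_pos hc]
      -- break test
      by_cases hb : ((c.modify (PySem.List.pyGetD labels (k:Int) 0) 0 (· + 1)).values.all (fun x => x == limit)) = true
      · -- break: every remaining index is already saturated
        have hrest : (PySem.List.pyRange ((k:Int)+1) labels.length 1).filter (rankLT labels limit) = [] := by
          rw [List.filter_eq_nil_iff]
          intro i hi
          rw [PySem.List.mem_pyRange_one] at hi
          set d' := c.modify (PySem.List.pyGetD labels (k:Int) 0) 0 (· + 1) with hd'
          have hmem : PySem.List.pyGetD labels i 0 ∈ labels := by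
            apply PySem.List.pyGetD_mem
            constructor <;> omega
          have hvals : d'.getD (PySem.List.pyGetD labels i 0) 0 = limit := by
            have hv := getD_mem_values (H1' _ hmem)
            rw [List.all_eq_true] at hb
            have := hb _ hv
            simpa using this
          rw [H2' (PySem.List.pyGetD labels i 0)] at hvals
          -- the count in the longer prefix dominates
          have hmono : (labels.take (k+1)).count (PySem.List.pyGetD labels i 0)
              ≤ (labels.take i.toNat).count (PySem.List.pyGetD labels i 0) := by
            exact (List.take_sublist_take_left (by omega)).count_le _
          rw [rankLT]
          simp only [decide_eq_true_eq]
          push Not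
          omega
        rw [if_pos hb]
        rw [List.filter_cons, if_pos hrank, hrest]
      · rw [if_neg hb]
        have hih := ih (k+1) _ (tr ++ [(k:Int)]) (by omega) (by omega) H1' H2'
        push_cast at hih
        rw [hih, List.filter_cons, if_pos hrank]
        simp
    case neg =>
      have hc : ¬ (c.getD (PySem.List.pyGetD labels (k:Int) 0) 0 < limit) := by
        rw [hlabel, H2]; omega
      have hrank : rankLT labels limit (k : Int) = false := by
        rw [rankLT]
        have : ((k : Int)).toNat = k := by omega
        rw [this]
        simpa [hlabel] using hlt
      have H2' : ∀ l : Int, c.getD l 0 = min ((labels.take (k+1)).count l : Int) (max limit 0) := by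
        intro l
        rw [H2, count_take_succ labels k hklt l]
        by_cases hl : labels[k] = l
        · rw [if_pos hl, ← hl]
          have := H2 (labels[k])
          rw [hlabel] at hc
          push_cast
          omega
        · rw [if_neg hl]
          simp
      simp only [limit_data_loop, if_neg hc]
      by_cases hb : (c.values.all (fun x => x == limit)) = true
      · have hrest : (PySem.List.pyRange ((k:Int)+1) labels.length 1).filter (rankLT labels limit) = [] := by
          rw [List.filter_eq_nil_iff]
          intro i hi
          rw [PySem.List.mem_pyRange_one] at hi
          have hmem : PySem.List.pyGetD labels i 0 ∈ labels := by
            apply PySem.List.pyGetD_mem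
            constructor <;> omega
          have hvals : c.getD (PySem.List.pyGetD labels i 0) 0 = limit := by
            have hv := getD_mem_values (H1 _ hmem)
            rw [List.all_eq_true] at hb
            have := hb _ hv
            simpa using this
          rw [H2' (PySem.List.pyGetD labels i 0)] at hvals
          have hmono : (labels.take (k+1)).count (PySem.List.pyGetD labels i 0)
              ≤ (labels.take i.toNat).count (PySem.List.pyGetD labels i 0) := by
            exact (List.take_sublist_take_left (by omega)).count_le _
          rw [rankLT]
          simp only [decide_eq_true_eq]
          push Not
          omega
        rw [if_pos hb]
        rw [List.filter_cons, if_neg (by simp [hrank]), hrest]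
        simp
      · rw [if_neg hb]
        have hih := ih (k+1) _ tr (by omega) (by omega) H1 H2'
        push_cast at hih
        rw [hih, List.filter_cons, if_neg (by simp [hrank])]

-- the initial counter: every label is a key and every stored count is 0
lemma init_counter_contains (labels : List Int) :
    ∀ l ∈ labels, (labels.foldl (fun d l => d.insert l 0)
      (PySem.Dict.empty (κ := Int) (ν := Int))).contains l = true := by
  intro l hl
  rw [PySem.Dict.contains_iff_mem_keys]
  rw [PySem.Dict.keys_foldl_insert labels (fun _ _ => (0 : Int)) PySem.Dict.empty]
  rw [show (PySem.Dict.empty (κ := Int) (ν := Int)).keys = [] from rfl]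
  rw [show PySem.Set.update ([] : List Int) labels = PySem.Set.ofList labels from
    PySem.Set.update_empty labels]
  exact (PySem.Set.mem_ofList labels l).mpr hl

lemma init_counter_getD (labels : List Int) :
    ∀ (d : PySem.Dict Int Int), (∀ l : Int, d.getD l 0 = 0) →
      ∀ l : Int, (labels.foldl (fun d l => d.insert l 0) d).getD l 0 = 0 := by
  induction labels with
  | nil => intro d hd l; exact hd l
  | cons a labels ih =>
    intro d hd l
    simp only [List.foldl_cons]
    refine ih _ (fun l' => ?_) l
    rw [PySem.Dict.getD_insert]
    split_ifs with h
    · rfl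
    · exact hd l'

-- A's train list is trainOf
lemma trainA_eq (labels : List Int) (limit : Int) :
    (limit_data_loop labels limit (PySem.List.pyRange 0 labels.length 1)
        (labels.foldl (fun d l => d.insert l 0) PySem.Dict.empty, [])).2
      = trainOf labels limit := by
  have h := loopA_char labels limit labels.length 0
      (labels.foldl (fun d l => d.insert l 0) PySem.Dict.empty) []
      (by omega) (by omega)
      (init_counter_contains labels)
      (by
        intro l
        rw [init_counter_getD labels PySem.Dict.empty (fun _ => rfl) l]
        simp)
  push_cast at h
  rw [h]
  rfl

-- B's sorted train set is trainOf as well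
lemma trainB_eq (labels : List Int) (limit : Int) :
    PySem.List.sorted
      (((PySem.List.enumerate labels 0).foldl
          (fun d p => d.modify p.2 [] (fun q => q ++ [p.1])) PySem.Dict.empty).values.foldl
        (fun s p => PySem.Set.update s (PySem.List.slice p none (some (max limit 0))))
        PySem.Set.empty)
      (fun x => x) false
      = trainOf labels limit := by
  rw [trainB_set_eq labels limit]
  exact PySem.List.sorted_eq_of_perm_of_pairwise_lt _ _ _
    (trainOf_perm_trainB labels limit) (trainOf_pairwise labels limit)

-- the two train lists have the same members, so the rest filters agree
lemma rest_eq (labels : List Int) (limit : Int) :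
    (PySem.List.pyRange 0 labels.length 1).filter
        (fun x => !((trainOf labels limit).contains x))
      = (PySem.List.pyRange 0 labels.length 1).filter
        (fun i => !(PySem.Set.contains
          (((PySem.List.enumerate labels 0).foldl
              (fun d p => d.modify p.2 [] (fun q => q ++ [p.1])) PySem.Dict.empty).values.foldl
            (fun s p => PySem.Set.update s (PySem.List.slice p none (some (max limit 0))))
            PySem.Set.empty) i)) := by
  apply List.filter_congr
  intro x _
  rw [PySem.Set.contains_eq_listContains, trainB_set_eq labels limit]
  congr 1
  rw [Bool.eq_iff_iff]
  simp only [List.contains_iff_mem]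
  exact (trainOf_perm_trainB labels limit).mem_iff

-- ===== VERDICT (by name: the statement is the Claim_ definition above) =====
theorem limit_data_spec : Claim_equal_limit_data := by
  intro labels limit val_num test_num _
  show limit_data labels limit val_num test_num = limit_data_alt labels limit val_num test_num
  simp only [limit_data, limit_data_alt]
  rw [trainA_eq labels limit, trainB_eq labels limit, rest_eq labels limit]
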